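-- pv_equiv track=rewrite | github.com/maluramichael/plex-directplay-convert | lib/language_utils.py | filter_and_sort_streams
-- ===== SOURCE A (Python) =====
-- LANGUAGE_MAP = {
--     # German variants
--     'de': 'de', 'deu': 'de', 'ger': 'de', 'german': 'de', 'deutsch': 'de',
--     # English variants
--     'en': 'en', 'eng': 'en', 'english': 'en',
--     # Japanese variants
--     'jp': 'jp', 'ja': 'jp', 'jpn': 'jp', 'japanese': 'jp',
--     # French variants
--     'fr': 'fr', 'fra': 'fr', 'fre': 'fr', 'french': 'fr',
--     # Spanish variants
--     'es': 'es', 'esp': 'es', 'spa': 'es', 'spanish': 'es',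
--     # Italian variants
--     'it': 'it', 'ita': 'it', 'italian': 'it',
--     # Common fallbacks
--     'unknown': 'unknown', 'und': 'unknown', '': 'unknown'
-- }
--
-- def normalize_language(lang_code):
--     """Normalize language code using mapping"""
--     if not lang_code:
--         return 'unknown'
--     return LANGUAGE_MAP.get(lang_code.lower(), lang_code.lower())
--
-- def filter_and_sort_streams(streams, languages, keep_languages=None, sort_languages=None):
--     """Filter and sort streams based on language preferences"""
--     if not streams:
--         return []
--
--     # Always keep 'unknown' language streams
--     keep_langs = set(keep_languages or [])
--     keep_langs.add('unknown')
--
--     # Filter streams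
--     if keep_languages:
--         filtered_streams = []
--         for i, stream in enumerate(streams):
--             tags = stream.get('tags', {})
--             lang = normalize_language(tags.get('language', ''))
--             if lang in keep_langs:
--                 filtered_streams.append((i, stream, lang))
--     else:
--         filtered_streams = [(i, stream, normalize_language(stream.get('tags', {}).get('language', '')))
--                            for i, stream in enumerate(streams)]
--
--     # Sort by language preference if specified
--     if sort_languages:
--         def sort_key(item):
--             _, stream, lang = item
--             try:
--                 return sort_languages.index(lang)
--             except ValueError:
--                 return len(sort_languages)  # Put unknown languages at end
--         filtered_streams.sort(key=sort_key)
--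
--     return filtered_streams
-- ===== SOURCE B (Python) =====
-- LANGUAGE_MAP = {
--     'de': 'de', 'deu': 'de', 'ger': 'de', 'german': 'de', 'deutsch': 'de',
--     'en': 'en', 'eng': 'en', 'english': 'en',
--     'jp': 'jp', 'ja': 'jp', 'jpn': 'jp', 'japanese': 'jp',
--     'fr': 'fr', 'fra': 'fr', 'fre': 'fr', 'french': 'fr',
--     'es': 'es', 'esp': 'es', 'spa': 'es', 'spanish': 'es',
--     'it': 'it', 'ita': 'it', 'italian': 'it',
--     'unknown': 'unknown', 'und': 'unknown', '': 'unknown'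
-- }
--
--
-- def normalize_language(lang_code):
--     if not lang_code:
--         return 'unknown'
--     return LANGUAGE_MAP.get(lang_code.lower(), lang_code.lower())
--
--
-- def filter_and_sort_streams(streams, languages, keep_languages=None, sort_languages=None):
--     """Filter by kept languages, then assemble the result by preference buckets
--     instead of sorting with an index key."""
--     if not streams:
--         return []
--     tagged = [(i, s, normalize_language(s.get('tags', {}).get('language', '')))
--               for i, s in enumerate(streams)]
--     if keep_languages:
--         keep = set(keep_languages)
--         keep.add('unknown')
--         filtered = [t for t in tagged if t[2] in keep]
--     else:
--         filtered = tagged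
--     if not sort_languages:
--         return filtered
--     buckets = {}
--     for t in filtered:
--         buckets.setdefault(t[2], []).append(t)
--     result = []
--     seen = set()
--     for lang in sort_languages:
--         if lang not in seen:
--             seen.add(lang)
--             result.extend(buckets.get(lang, []))
--     sl_set = set(sort_languages)
--     result.extend(t for t in filtered if t[2] not in sl_set)
--     return result
-- ===== Notes on version B (the rewrite author's own statement) =====
-- stated objective: faster
-- what changed: Replaces list.sort with a key that scans sort_languages.index per item by a single-pass bucket dictionary keyed by language plus one walk over sort_languages with a seen-set, appending the untargeted tail via a set membership test.
import Mathlib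
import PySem

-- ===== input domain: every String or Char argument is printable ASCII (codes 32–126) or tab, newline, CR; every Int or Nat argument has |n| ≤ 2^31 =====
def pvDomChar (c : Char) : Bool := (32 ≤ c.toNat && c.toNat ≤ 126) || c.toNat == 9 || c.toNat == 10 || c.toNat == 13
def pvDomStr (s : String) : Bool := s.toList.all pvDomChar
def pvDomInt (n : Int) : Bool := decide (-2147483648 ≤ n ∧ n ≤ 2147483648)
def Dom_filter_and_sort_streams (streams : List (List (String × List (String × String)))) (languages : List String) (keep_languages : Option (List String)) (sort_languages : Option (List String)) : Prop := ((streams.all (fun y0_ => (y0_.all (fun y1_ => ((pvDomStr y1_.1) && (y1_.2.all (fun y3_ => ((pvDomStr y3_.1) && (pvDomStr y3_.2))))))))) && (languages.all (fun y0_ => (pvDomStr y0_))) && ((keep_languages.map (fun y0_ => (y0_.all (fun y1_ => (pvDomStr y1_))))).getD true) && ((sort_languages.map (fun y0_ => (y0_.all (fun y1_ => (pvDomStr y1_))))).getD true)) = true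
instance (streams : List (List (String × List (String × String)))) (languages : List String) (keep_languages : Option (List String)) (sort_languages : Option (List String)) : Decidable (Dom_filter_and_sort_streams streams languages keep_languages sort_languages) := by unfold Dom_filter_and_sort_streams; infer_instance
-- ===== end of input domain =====

-- B replaces A's list.sort with an index?-scanning key by a one-pass bucket dictionary
-- plus a single walk over the preference list (objective: faster, no per-item index scan).

-- ===== PORT A =====
-- module constant LANGUAGE_MAP (distinct keys, insertion order as written)
def pvLangMap : PySem.Dict String String := ⟨[("de","de"),("deu","de"),("ger","de"),("german","de"),("deutsch","de"),
  ("en","en"),("eng","en"),("english","en"),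
  ("jp","jp"),("ja","jp"),("jpn","jp"),("japanese","jp"),
  ("fr","fr"),("fra","fr"),("fre","fr"),("french","fr"),
  ("es","es"),("esp","es"),("spa","es"),("spanish","es"),
  ("it","it"),("ita","it"),("italian","it"),
  ("unknown","unknown"),("und","unknown"),("","unknown")]⟩

-- module helper normalize_language (shared by both Pythons verbatim)
def normalize_language (lang_code : String) : String :=
  if lang_code = "" then "unknown"
  else PySem.Dict.getD pvLangMap (PySem.Str.lower lang_code) (PySem.Str.lower lang_code)

-- Python truthiness of an Optional[list[str]]
def pvTruthy (o : Option (List String)) : Bool := !(o.getD []).isEmpty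

def filter_and_sort_streams (streams : List (List (String × List (String × String)))) (languages : List String) (keep_languages : Option (List String)) (sort_languages : Option (List String)) : List (Int × (List (String × List (String × String))) × String) :=
  if streams = [] then []
  else
    let keep_langs := PySem.Set.add (PySem.Set.ofList (keep_languages.getD [])) "unknown"
    let filtered_streams :=
      if pvTruthy keep_languages then
        (PySem.List.enumerate streams 0).foldl (fun acc p =>
          let tags := PySem.Dict.getD (PySem.Dict.mk p.2) "tags" []
          let lang := normalize_language (PySem.Dict.getD (PySem.Dict.mk tags) "language" "")
          if PySem.Set.contains keep_langs lang then acc ++ [(p.1, p.2, lang)] else acc) []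
      else
        (PySem.List.enumerate streams 0).map (fun p =>
          (p.1, p.2, normalize_language (PySem.Dict.getD (PySem.Dict.mk (PySem.Dict.getD (PySem.Dict.mk p.2) "tags" [])) "language" "")))
    if pvTruthy sort_languages then
      let sl := sort_languages.getD []
      PySem.List.sorted filtered_streams (fun it => (PySem.List.index? sl it.2.2).getD sl.length) false
    else filtered_streams

-- ===== PORT B =====
def filter_and_sort_streams_alt (streams : List (List (String × List (String × String)))) (languages : List String) (keep_languages : Option (List String)) (sort_languages : Option (List String)) : List (Int × (List (String × List (String × String))) × String) :=
  if streams = [] then []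
  else
    let tagged := (PySem.List.enumerate streams 0).map (fun p =>
      (p.1, p.2, normalize_language (PySem.Dict.getD (PySem.Dict.mk (PySem.Dict.getD (PySem.Dict.mk p.2) "tags" [])) "language" "")))
    let filtered :=
      if pvTruthy keep_languages then
        let keep := PySem.Set.add (PySem.Set.ofList (keep_languages.getD [])) "unknown"
        tagged.filter (fun t => PySem.Set.contains keep t.2.2)
      else tagged
    if !pvTruthy sort_languages then filtered
    else
      let sl := sort_languages.getD []
      let buckets := filtered.foldl (fun d t => PySem.Dict.modify d t.2.2 [] (fun l => l ++ [t])) PySem.Dict.empty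
      let res := sl.foldl (fun st lang =>
          if PySem.Set.contains st.1 lang then st
          else (PySem.Set.add st.1 lang, st.2 ++ PySem.Dict.getD buckets lang []))
        ((PySem.Set.empty : PySem.Set String), ([] : List (Int × (List (String × List (String × String))) × String)))
      let sl_set := PySem.Set.ofList sl
      res.2 ++ filtered.filter (fun t => !(PySem.Set.contains sl_set t.2.2))

-- ===== PRECONDITION & SPEC =====
def Spec_filter_and_sort_streams (streams : List (List (String × List (String × String)))) (languages : List String) (keep_languages : Option (List String)) (sort_languages : Option (List String)) (out : List (Int × (List (String × List (String × String))) × String)) : Prop := out = filter_and_sort_streams_alt streams languages keep_languages sort_languages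
instance (streams : List (List (String × List (String × String)))) (languages : List String) (keep_languages : Option (List String)) (sort_languages : Option (List String)) (out : List (Int × (List (String × List (String × String))) × String)) : Decidable (Spec_filter_and_sort_streams streams languages keep_languages sort_languages out) := by
  unfold Spec_filter_and_sort_streams
  letI h1 : DecidableEq (List (String × List (String × String)) × String) := inferInstance
  letI h2 : DecidableEq (Int × (List (String × List (String × String))) × String) := instDecidableEqProd
  infer_instance

-- ===== CLAIM (what is proved, stated in full; the proofs are below) =====
def Claim_equal_filter_and_sort_streams : Prop := ∀ (streams : List (List (String × List (String × String)))) (languages : List String) (keep_languages : Option (List String)) (sort_languages : Option (List String)), Dom_filter_and_sort_streams streams languages keep_languages sort_languages → Spec_filter_and_sort_streams streams languages keep_languages sort_languages (filter_and_sort_streams streams languages keep_languages sort_languages)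

-- ===== LEMMAS AND PROOFS =====

-- first index of a language in the preference list (A's sort key), proofs only
def pvIdx (sl : List String) (lang : String) : Nat :=
  (PySem.List.index? sl lang).getD sl.length

lemma pvIdx_lt_of_mem {sl : List String} {b : String} (h : b ∈ sl) : pvIdx sl b < sl.length := by
  have hs : (PySem.List.index? sl b).isSome := (PySem.List.index?_isSome_iff sl b).mpr h
  obtain ⟨j, hj⟩ := Option.isSome_iff_exists.mp hs
  obtain ⟨hk, -, -⟩ := PySem.List.getElem_of_index?_eq_some hj
  have hj' : List.idxOf? b sl = some j := hj
  simp [pvIdx, PySem.List.index?, hj', hk]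

lemma pvIdx_eq_of_not_mem {sl : List String} {b : String} (h : b ∉ sl) : pvIdx sl b = sl.length := by
  have h0 : PySem.List.index? sl b = none := (PySem.List.index?_eq_none_iff sl b).mpr h
  have h1 : List.idxOf? b sl = none := h0
  simp [pvIdx, PySem.List.index?, h1]

lemma pvIdx_inj {sl : List String} {a b : String} (ha : a ∈ sl) (hb : b ∈ sl)
    (h : pvIdx sl a = pvIdx sl b) : a = b := by
  obtain ⟨ja, hja⟩ := Option.isSome_iff_exists.mp ((PySem.List.index?_isSome_iff sl a).mpr ha)
  obtain ⟨jb, hjb⟩ := Option.isSome_iff_exists.mp ((PySem.List.index?_isSome_iff sl b).mpr hb)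
  obtain ⟨hka, hgeta, -⟩ := PySem.List.getElem_of_index?_eq_some hja
  obtain ⟨hkb, hgetb, -⟩ := PySem.List.getElem_of_index?_eq_some hjb
  have hja' : List.idxOf? a sl = some ja := hja
  have hjb' : List.idxOf? b sl = some jb := hjb
  have hj : ja = jb := by
    simp only [pvIdx, PySem.List.index?, hja', hjb', Option.getD_some] at h
    exact h
  subst hj
  rw [← hgeta, ← hgetb]

lemma pvIdx_cons_of_mem {x b : String} {xs : List String} (hb : b ∈ xs) (hne : b ≠ x) :
    pvIdx (x :: xs) b = pvIdx xs b + 1 := by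
  obtain ⟨j, hj⟩ := Option.isSome_iff_exists.mp ((PySem.List.index?_isSome_iff xs b).mpr hb)
  have hcons := PySem.List.index?_cons_of_ne (x := x) (xs := xs) (v := b) (Ne.symm hne)
  rw [hj] at hcons
  have hj' : List.idxOf? b xs = some j := hj
  have hcons' : List.idxOf? b (x :: xs) = some (j + 1) := hcons
  simp [pvIdx, PySem.List.index?, hj', hcons']

-- first indices strictly increase along the ordered dedup of sl
lemma dedup_pairwise_idx (sl : List String) :
    (PySem.List.dedup sl).Pairwise (fun a b => pvIdx sl a < pvIdx sl b) := by
  induction sl with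
  | nil => simp [PySem.List.dedup_eq_ofList, PySem.Set.ofList_nil]
  | cons x xs ih =>
    rw [PySem.List.dedup_eq_ofList, PySem.Set.ofList_cons]
    constructor
    · intro b hb
      have hb' : b ∈ PySem.Set.ofList xs ∧ b ≠ x := (PySem.Set.mem_discard _ _ _).mp hb
      have hbx : b ∈ xs := (PySem.Set.mem_ofList _ _).mp hb'.1
      have h0 : pvIdx (x :: xs) x = 0 := by
        have h1 : List.idxOf? x (x :: xs) = some 0 := PySem.List.index?_cons_self x xs
        simp [pvIdx, PySem.List.index?, h1]
      rw [h0, pvIdx_cons_of_mem hbx hb'.2]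
      omega
    · have hP : (PySem.Set.discard (PySem.Set.ofList xs) x).Pairwise
          (fun a b => pvIdx xs a < pvIdx xs b) := by
        have h2 := ih
        rw [PySem.List.dedup_eq_ofList] at h2
        exact List.Pairwise.sublist List.filter_sublist h2
      refine hP.imp_of_mem ?_
      intro a b hma hmb hab
      have ha' : a ∈ PySem.Set.ofList xs ∧ a ≠ x := (PySem.Set.mem_discard _ _ _).mp hma
      have hb' : b ∈ PySem.Set.ofList xs ∧ b ≠ x := (PySem.Set.mem_discard _ _ _).mp hmb
      rw [pvIdx_cons_of_mem ((PySem.Set.mem_ofList _ _).mp ha'.1) ha'.2,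
          pvIdx_cons_of_mem ((PySem.Set.mem_ofList _ _).mp hb'.1) hb'.2]
      omega

-- insertBy skips a prefix it is not 'before'
lemma insertBy_append {α : Type} (before : α → α → Bool) (x : α) (pre l : List α)
    (h : ∀ a ∈ pre, before x a = false) :
    PySem.List.insertBy before x (pre ++ l) = pre ++ PySem.List.insertBy before x l := by
  induction pre with
  | nil => simp
  | cons a pre ih =>
    have ha : before x a = false := h a (List.mem_cons_self)
    simp [PySem.List.insertBy, ha, ih (fun b hb => h b (List.mem_cons_of_mem _ hb))]

lemma insertBy_forall_true {α : Type} (before : α → α → Bool) (x : α) (l : List α)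
    (h : ∀ b ∈ l, before x b = true) :
    PySem.List.insertBy before x l = x :: l := by
  cases l with
  | nil => rfl
  | cons b bs => simp [PySem.List.insertBy, h b (List.mem_cons_self)]

lemma flatMap_map' {α β γ : Type} (f : α → β) (g : β → List γ) (l : List α) :
    (l.map f).flatMap g = l.flatMap (fun x => g (f x)) := by
  induction l with
  | nil => simp
  | cons a l ih => simp [ih]

-- inserting x into the bucket concatenation lands at the end of x's bucket
lemma insert_flatMap {α : Type} (key : α → Nat) (x : α) (xs : List α) :
    ∀ ks : List Nat, ks.Pairwise (· < ·) → key x ∈ ks →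
    PySem.List.insertBy (fun a b => decide (key a < key b)) x
        (ks.flatMap (fun k => xs.filter (fun y => key y == k)))
      = ks.flatMap (fun k => (xs ++ [x]).filter (fun y => key y == k)) := by
  intro ks
  induction ks with
  | nil => intro _ hmem; simp at hmem
  | cons k ks ih =>
    intro hpw hmem
    rcases List.pairwise_cons.mp hpw with ⟨hlt, hp⟩
    simp only [List.flatMap_cons]
    by_cases hk : key x = k
    · have hpre : ∀ a ∈ xs.filter (fun y => key y == k),
          (fun a b => decide (key a < key b)) x a = false := by
        intro a ha
        have hak : key a = k := by simpa using (List.mem_filter.mp ha).2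
        simp [hk, hak]
      rw [insertBy_append _ _ _ _ hpre]
      have hrest : ∀ b ∈ ks.flatMap (fun k => xs.filter (fun y => key y == k)),
          (fun a b => decide (key a < key b)) x b = true := by
        intro b hbm
        rcases List.mem_flatMap.mp hbm with ⟨k', hk', hbf⟩
        have hbk : key b = k' := by simpa using (List.mem_filter.mp hbf).2
        have hlt' : k < k' := hlt k' hk'
        simp only [hk, hbk, decide_eq_true_eq]
        omega
      rw [insertBy_forall_true _ _ _ hrest]
      have hbucket : (xs ++ [x]).filter (fun y => key y == k)
          = xs.filter (fun y => key y == k) ++ [x] := by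
        simp [List.filter_append, hk]
      rw [hbucket]
      have hrest2 : ks.flatMap (fun k => (xs ++ [x]).filter (fun y => key y == k))
          = ks.flatMap (fun k => xs.filter (fun y => key y == k)) := by
        apply List.flatMap_congr
        intro k' hk'
        have h1 : k < k' := hlt k' hk'
        have h2 : ¬ key x = k' := by omega
        simp [List.filter_append, h2]
      rw [hrest2]
      simp
    · have hmem' : key x ∈ ks := by
        rcases List.mem_cons.mp hmem with h | h
        · exact absurd h hk
        · exact h
      have hkx : k < key x := hlt _ hmem'
      have hpre : ∀ a ∈ xs.filter (fun y => key y == k),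
          (fun a b => decide (key a < key b)) x a = false := by
        intro a ha
        have hak : key a = k := by simpa using (List.mem_filter.mp ha).2
        simp only [hak, decide_eq_false_iff_not]
        omega
      rw [insertBy_append _ _ _ _ hpre, ih hp hmem']
      have hbucket : (xs ++ [x]).filter (fun y => key y == k)
          = xs.filter (fun y => key y == k) := by
        simp [List.filter_append, hk]
      rw [hbucket]

-- a stable sort by a Nat key is the concatenation of the key buckets in increasing key order
lemma sorted_eq_flatMap {α : Type} (key : α → Nat) (xs : List α) :
    ∀ ks : List Nat, ks.Pairwise (· < ·) → (∀ x ∈ xs, key x ∈ ks) →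
    PySem.List.sorted xs key false = ks.flatMap (fun k => xs.filter (fun y => key y == k)) := by
  induction xs using List.reverseRecOn with
  | nil => intro ks _ _; simp [PySem.List.sorted]
  | append_singleton xs x ih =>
    intro ks hpw hmem
    have hsort : PySem.List.sorted (xs ++ [x]) key false
        = PySem.List.insertBy (fun a b => decide (key a < key b)) x
            (PySem.List.sorted xs key false) := by
      rw [PySem.List.sorted_eq_foldl_insertBy, PySem.List.sorted_eq_foldl_insertBy,
          List.foldl_append]
      simp
    rw [hsort, ih ks hpw (fun y hy => hmem y (List.mem_append_left _ hy))]
    exact insert_flatMap key x xs ks hpw (hmem x (by simp))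

lemma pv_contains_eq (s : List String) (y : String) :
    PySem.Set.contains s y = decide (y ∈ s) := by
  by_cases h : y ∈ s
  · simp [h, PySem.Set.contains_iff]
  · simp only [h, decide_false]
    by_contra hne
    exact h ((PySem.Set.contains_iff s y).mp (by revert hne; cases PySem.Set.contains s y <;> simp))

-- B's seen-set loop emits one bucket per first occurrence
lemma seen_loop {γ : Type} (f : String → List γ) :
    ∀ (ls : List String) (s : PySem.Set String) (acc : List γ),
    (ls.foldl (fun st lang =>
        if PySem.Set.contains st.1 lang then st
        else (PySem.Set.add st.1 lang, st.2 ++ f lang)) (s, acc)).2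
      = acc ++ ((PySem.List.dedup ls).filter (fun y => !(PySem.Set.contains s y))).flatMap f := by
  intro ls
  induction ls with
  | nil => intro s acc; simp [PySem.List.dedup_eq_ofList, PySem.Set.ofList_nil]
  | cons l ls ih =>
    intro s acc
    rw [List.foldl_cons, PySem.List.dedup_eq_ofList, PySem.Set.ofList_cons]
    by_cases hc : l ∈ s
    · rw [if_pos (by simp [pv_contains_eq, hc])]
      rw [ih s acc, PySem.List.dedup_eq_ofList]
      congr 1
      have h1 : (PySem.Set.ofList ls).filter (fun y => !(PySem.Set.contains s y))
          = (PySem.Set.discard (PySem.Set.ofList ls) l).filter (fun y => !(PySem.Set.contains s y)) := by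
        unfold PySem.Set.discard
        rw [List.filter_filter]
        apply List.filter_congr
        intro y _
        by_cases hy : y = l
        · simp [hy, pv_contains_eq, hc]
        · simp [hy]
      rw [List.filter_cons, if_neg (by simp [pv_contains_eq, hc]), ← h1]
    · rw [if_neg (by simp [pv_contains_eq, hc])]
      rw [PySem.Set.add_of_not_mem hc, ih (s ++ [l]) (acc ++ f l), PySem.List.dedup_eq_ofList]
      rw [List.filter_cons, if_pos (by simp [pv_contains_eq, hc])]
      have h1 : (PySem.Set.ofList ls).filter (fun y => !(PySem.Set.contains (s ++ [l]) y))
          = (PySem.Set.discard (PySem.Set.ofList ls) l).filter (fun y => !(PySem.Set.contains s y)) := by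
        unfold PySem.Set.discard
        rw [List.filter_filter]
        apply List.filter_congr
        intro y _
        by_cases hy : y = l
        · simp [hy, pv_contains_eq]
        · simp [hy, pv_contains_eq, List.mem_append]
      rw [h1]
      simp

-- B's bucket dictionary holds exactly the per-language stable filters
lemma buckets_getD (filtered : List (Int × (List (String × List (String × String))) × String)) (lang : String) :
    (filtered.foldl (fun d t => PySem.Dict.modify d t.2.2 [] (fun l => l ++ [t])) PySem.Dict.empty).getD lang []
      = filtered.filter (fun t => t.2.2 == lang) := by
  have h1 : filtered.foldl (fun d t => PySem.Dict.modify d t.2.2 [] (fun l => l ++ [t])) PySem.Dict.empty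
      = (filtered.map (fun t => (t.2.2, t))).foldl
          (fun d p => PySem.Dict.modify d p.1 [] (fun l => l ++ [p.2])) PySem.Dict.empty := by
    rw [List.foldl_map]
  rw [h1, PySem.Dict.getD_foldl_modify_append]
  simp [List.filter_map, List.map_map, Function.comp_def]

-- the whole sort phase: A's stable sort equals B's bucket assembly
lemma sort_phase (L : List (Int × (List (String × List (String × String))) × String)) (sl : List String) :
    PySem.List.sorted L (fun it => (PySem.List.index? sl it.2.2).getD sl.length) false
      = (sl.foldl (fun st lang =>
            if PySem.Set.contains st.1 lang then st
            else (PySem.Set.add st.1 lang, st.2 ++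
              PySem.Dict.getD (L.foldl (fun d t => PySem.Dict.modify d t.2.2 [] (fun l => l ++ [t])) PySem.Dict.empty) lang []))
          ((PySem.Set.empty : PySem.Set String), ([] : List (Int × (List (String × List (String × String))) × String)))).2
        ++ L.filter (fun t => !(PySem.Set.contains (PySem.Set.ofList sl) t.2.2)) := by
  rw [seen_loop]
  have hfT : ((PySem.List.dedup sl).filter (fun y => !(PySem.Set.contains (PySem.Set.empty : PySem.Set String) y)))
      = PySem.List.dedup sl := by
    apply List.filter_eq_self.mpr
    intro y _
    simp [pv_contains_eq, PySem.Set.empty]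
  rw [hfT, List.nil_append]
  have hb : (PySem.List.dedup sl).flatMap
        (fun lang => PySem.Dict.getD (L.foldl (fun d t => PySem.Dict.modify d t.2.2 [] (fun l => l ++ [t])) PySem.Dict.empty) lang [])
      = (PySem.List.dedup sl).flatMap (fun lang => L.filter (fun t => t.2.2 == lang)) :=
    List.flatMap_congr (fun lang _ => buckets_getD L lang)
  rw [hb]
  -- now characterise A's stable sort
  have hkey : (fun it : Int × (List (String × List (String × String))) × String =>
      (PySem.List.index? sl it.2.2).getD sl.length) = (fun it => pvIdx sl it.2.2) := rfl
  rw [hkey]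
  have hpw : ((PySem.List.dedup sl).map (pvIdx sl) ++ [sl.length]).Pairwise (· < ·) := by
    apply List.pairwise_append.mpr
    refine ⟨List.pairwise_map.mpr (dedup_pairwise_idx sl), List.pairwise_singleton _ _, ?_⟩
    intro a ha b hb
    rcases List.mem_map.mp ha with ⟨lang, hlang, rfl⟩
    have : b = sl.length := by simpa using hb
    subst this
    exact pvIdx_lt_of_mem ((PySem.List.mem_dedup sl lang).mp hlang)
  have hcov : ∀ y ∈ L, pvIdx sl y.2.2 ∈ (PySem.List.dedup sl).map (pvIdx sl) ++ [sl.length] := by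
    intro y _
    by_cases hm : y.2.2 ∈ sl
    · exact List.mem_append_left _ (List.mem_map.mpr ⟨y.2.2, (PySem.List.mem_dedup sl _).mpr hm, rfl⟩)
    · rw [pvIdx_eq_of_not_mem hm]; simp
  rw [sorted_eq_flatMap (fun it => pvIdx sl it.2.2) L _ hpw hcov]
  rw [List.flatMap_append, flatMap_map']
  congr 1
  · apply List.flatMap_congr
    intro lang hlang
    have hlsl : lang ∈ sl := (PySem.List.mem_dedup sl lang).mp hlang
    apply List.filter_congr
    intro y _
    by_cases hy : y.2.2 = lang
    · simp [hy]
    · have h2 : ¬ pvIdx sl y.2.2 = pvIdx sl lang := by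
        intro he
        by_cases hm : y.2.2 ∈ sl
        · exact hy (pvIdx_inj hm hlsl he)
        · rw [pvIdx_eq_of_not_mem hm] at he
          have := pvIdx_lt_of_mem hlsl
          omega
      simp [hy, h2]
  · simp only [List.flatMap_cons, List.flatMap_nil, List.append_nil]
    apply List.filter_congr
    intro y _
    by_cases hm : y.2.2 ∈ sl
    · have h1 : pvIdx sl y.2.2 < sl.length := pvIdx_lt_of_mem hm
      have h2 : ¬ pvIdx sl y.2.2 = sl.length := by omega
      simp [h2, pv_contains_eq, (PySem.Set.mem_ofList _ _).mpr hm]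
    · have h2 : pvIdx sl y.2.2 = sl.length := pvIdx_eq_of_not_mem hm
      have h3 : ¬ y.2.2 ∈ PySem.Set.ofList sl := fun hc => hm ((PySem.Set.mem_ofList _ _).mp hc)
      simp [h2, pv_contains_eq, h3]

-- A's filtering loop is B's map-then-filter
lemma filter_phase (E : List (Int × List (String × List (String × String)))) (K : PySem.Set String) :
    E.foldl (fun acc p =>
        let tags := PySem.Dict.getD (PySem.Dict.mk p.2) "tags" []
        let lang := normalize_language (PySem.Dict.getD (PySem.Dict.mk tags) "language" "")
        if PySem.Set.contains K lang then acc ++ [(p.1, p.2, lang)] else acc) []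
      = (E.map (fun p => (p.1, p.2, normalize_language
            (PySem.Dict.getD (PySem.Dict.mk (PySem.Dict.getD (PySem.Dict.mk p.2) "tags" [])) "language" "")))).filter
          (fun t => PySem.Set.contains K t.2.2) := by
  rw [List.filter_map]
  have h := PySem.List.foldl_append_if (l := E) (acc := ([] : List (Int × (List (String × List (String × String))) × String)))
      (p := fun p : Int × List (String × List (String × String)) => PySem.Set.contains K (normalize_language
        (PySem.Dict.getD (PySem.Dict.mk (PySem.Dict.getD (PySem.Dict.mk p.2) "tags" [])) "language" "")))
      (f := fun p : Int × List (String × List (String × String)) => (p.1, p.2, normalize_language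
        (PySem.Dict.getD (PySem.Dict.mk (PySem.Dict.getD (PySem.Dict.mk p.2) "tags" [])) "language" "")))
  exact h.trans (by simp only [List.nil_append]; rfl)

-- ===== VERDICT (by name: the statement is the Claim_ definition above) =====
theorem filter_and_sort_streams_spec : Claim_equal_filter_and_sort_streams := by
  intro streams languages keep_languages sort_languages _
  unfold Spec_filter_and_sort_streams filter_and_sort_streams filter_and_sort_streams_alt
  by_cases hs : streams = []
  · simp [hs]
  · simp only [if_neg hs]
    have hfil := filter_phase (PySem.List.enumerate streams 0)
      (PySem.Set.add (PySem.Set.ofList (keep_languages.getD [])) "unknown")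
    by_cases ht : pvTruthy sort_languages
    · by_cases hk : pvTruthy keep_languages
      · simp only [hk, ht, if_pos, Bool.not_true, Bool.false_eq_true, if_false]
        rw [hfil]
        exact sort_phase _ _
      · simp only [hk, ht, Bool.false_eq_true, if_false, Bool.not_true, if_true]
        exact sort_phase _ _
    · by_cases hk : pvTruthy keep_languages
      · simp only [hk, ht, Bool.not_false, if_true, Bool.false_eq_true, if_false]
        exact hfil
      · simp only [hk, ht, Bool.not_false, if_true, Bool.false_eq_true, if_false]
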